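-- pv_equiv track=rewrite | github.com/sergiodguezc/elgamal | src/utils.py | message_to_ascii_blocks
-- ===== SOURCE A (Python) =====
-- def message_to_ascii_blocks(msg: str, blk_size: int) -> list:
--     blocks = []
--
--     ascii = ord(msg[0])  # Compute ASCII value of a one-point string
--     for i in range(1, len(msg)):
--         if (i % blk_size == 0):
--             blocks.append(ascii)
--             ascii = 0
--         # ASCII values have at most 3 characters
--         ascii = 1000 * ascii + ord(msg[i])
--     blocks.append(ascii)  # Add the last element
--     return blocks
-- ===== SOURCE B (Python) =====
-- def message_to_ascii_blocks(msg: str, blk_size: int) -> list: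
--     blocks = []
--     for start in range(0, len(msg), blk_size):
--         val = 0
--         for ch in msg[start:start + blk_size]:
--             val = 1000 * val + ord(ch)
--         blocks.append(val)
--     return blocks
-- ===== Notes on version B (the rewrite author's own statement) =====
-- stated objective: alternative
-- what changed: A's single flat index loop with a modulo-triggered flush is replaced by an outer loop over chunk start offsets (range with step blk_size) and an inner fold of each chunk into its block value; Pre_ restricts to the natural domain msg nonempty and blk_size >= 1, excluding the empty message (A raises IndexError) and non-positive block sizes, where A's values/exceptions are accidents of its modulo test.
-- outside the precondition, e.g. on message_to_ascii_blocks('ab', -1): A returns [97, 98], B returns []; on message_to_ascii_blocks('a', 0): A returns [97], B raises ValueError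
-- crash fix: On an empty message (with blk_size != 0) A raises IndexError at ord(msg[0]) while B returns []. — e.g. on message_to_ascii_blocks("", 1): A raises IndexError, B returns []
import Mathlib
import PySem

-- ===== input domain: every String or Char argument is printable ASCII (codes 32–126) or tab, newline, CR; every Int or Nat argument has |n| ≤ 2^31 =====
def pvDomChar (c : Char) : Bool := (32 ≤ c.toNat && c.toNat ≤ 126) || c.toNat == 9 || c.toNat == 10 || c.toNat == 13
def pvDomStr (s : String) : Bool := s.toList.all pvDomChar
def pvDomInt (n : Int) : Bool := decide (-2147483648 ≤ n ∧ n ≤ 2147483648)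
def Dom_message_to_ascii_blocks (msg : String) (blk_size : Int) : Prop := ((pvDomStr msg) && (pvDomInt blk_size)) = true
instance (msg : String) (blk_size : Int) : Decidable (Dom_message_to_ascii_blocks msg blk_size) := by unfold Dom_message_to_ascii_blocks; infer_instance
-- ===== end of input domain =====

-- B packs the message by chunk offsets (slice + inner fold per chunk) instead of A's flat
-- index loop with a modulo-triggered flush; same cost, different decomposition. Pre_ keeps
-- the natural domain: nonempty message and positive block size.


-- ===== PORT A =====
-- the flat loop `for i in range(1, len(msg))`: structural recursion over the remaining
-- characters, carrying the running index i, the accumulator `ascii` and `blocks`.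
-- `i % blk_size == 0` is ported with PySem.Int.mod? (none = ZeroDivisionError, excluded by Pre_).
def pvALoop (blk : Int) : List Char → Int → Int → List Int → List Int
  | [], _, ascii, blocks => blocks ++ [ascii]          -- blocks.append(ascii) after the loop
  | c :: rest, i, ascii, blocks =>
      if PySem.Int.mod? i blk = some 0 then
        -- blocks.append(ascii); ascii = 0; ascii = 1000*ascii + ord(msg[i])
        pvALoop blk rest (i + 1) (1000 * 0 + (c.toNat : Int)) (blocks ++ [ascii])
      else
        pvALoop blk rest (i + 1) (1000 * ascii + (c.toNat : Int)) blocks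

def message_to_ascii_blocks (msg : String) (blk_size : Int) : List Int :=
  match msg.toList with
  | [] => []                                           -- Python: IndexError at ord(msg[0]) (outside Pre_)
  | c :: rest => pvALoop blk_size rest 1 (c.toNat : Int) []

-- ===== PORT B =====
-- the outer loop `for start in range(0, len(msg), blk_size)` with slice msg[start:start+blk_size]:
-- structural recursion producing the successive chunks (km1 + 1 = blk_size, positive under Pre_;
-- for blk_size ≤ 0 the Python range is empty or raises, both outside Pre_).
def pvChunks (km1 : Nat) : List Char → List (List Char)
  | [] => []
  | c :: cs => (c :: cs).take (km1 + 1) :: pvChunks km1 (cs.drop km1)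
termination_by cs => cs.length

-- inner loop: val = 0; for ch in chunk: val = 1000*val + ord(ch)
def pvBlockVal (chunk : List Char) : Int :=
  chunk.foldl (fun v c => 1000 * v + (c.toNat : Int)) 0

def message_to_ascii_blocks_alt (msg : String) (blk_size : Int) : List Int :=
  if 1 ≤ blk_size then (pvChunks (blk_size.toNat - 1) msg.toList).map pvBlockVal
  else []                                              -- Python: empty range (blk_size < 0) / ValueError (= 0), outside Pre_

-- ===== PRECONDITION & SPEC =====
-- Pre_ restricts to the natural domain of the task: a nonempty message and a positive block
-- size. Excluded and why: empty msg (A raises IndexError at ord(msg[0])); blk_size = 0 (A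
-- raises ZeroDivisionError whenever len(msg) ≥ 2, and its value [ord c] on a one-character
-- message is an accident of the loop never running, while B's range raises ValueError);
-- blk_size < 0 (A's chunking by |blk_size| is an accident of Python's modulo sign rule,
-- while B's empty range yields []).
def Pre_message_to_ascii_blocks (msg : String) (blk_size : Int) : Prop :=
  msg ≠ "" ∧ 1 ≤ blk_size
instance (msg : String) (blk_size : Int) : Decidable (Pre_message_to_ascii_blocks msg blk_size) := by unfold Pre_message_to_ascii_blocks; infer_instance

def pvWitness_message_to_ascii_blocks : String × Int := ("Hi!", 2)

-- On an empty message (with blk_size ≠ 0) A raises IndexError at ord(msg[0]) while B returns [].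
def Raises_message_to_ascii_blocks (msg : String) (blk_size : Int) : Prop :=
  msg = "" ∧ blk_size ≠ 0
instance (msg : String) (blk_size : Int) : Decidable (Raises_message_to_ascii_blocks msg blk_size) := by unfold Raises_message_to_ascii_blocks; infer_instance
def pvRaiseWitness_message_to_ascii_blocks : String × Int := ("", 1)
def pvRaiseWitnessOut_message_to_ascii_blocks : List Int := []

def Spec_message_to_ascii_blocks (msg : String) (blk_size : Int) (out : List Int) : Prop := out = message_to_ascii_blocks_alt msg blk_size
instance (msg : String) (blk_size : Int) (out : List Int) : Decidable (Spec_message_to_ascii_blocks msg blk_size out) := by unfold Spec_message_to_ascii_blocks; infer_instance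

-- ===== CLAIM =====
def Claim_equal_message_to_ascii_blocks : Prop := ∀ (msg : String) (blk_size : Int), Dom_message_to_ascii_blocks msg blk_size → Pre_message_to_ascii_blocks msg blk_size → Spec_message_to_ascii_blocks msg blk_size (message_to_ascii_blocks msg blk_size)

def Claim_raises_message_to_ascii_blocks : Prop := (∀ (msg : String) (blk_size : Int), Dom_message_to_ascii_blocks msg blk_size → Raises_message_to_ascii_blocks msg blk_size → ¬ Pre_message_to_ascii_blocks msg blk_size) ∧ (Dom_message_to_ascii_blocks (pvRaiseWitness_message_to_ascii_blocks.1) (pvRaiseWitness_message_to_ascii_blocks.2) ∧ Raises_message_to_ascii_blocks (pvRaiseWitness_message_to_ascii_blocks.1) (pvRaiseWitness_message_to_ascii_blocks.2) ∧ message_to_ascii_blocks_alt (pvRaiseWitness_message_to_ascii_blocks.1) (pvRaiseWitness_message_to_ascii_blocks.2) = pvRaiseWitnessOut_message_to_ascii_blocks)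

-- ===== LEMMAS AND PROOFS =====

-- A's flush condition `i % blk == 0` is divisibility by |blk| (blk ≠ 0).
theorem pvMod?_zero_iff (i blk : Int) (hb : blk ≠ 0) :
    (PySem.Int.mod? i blk = some 0) ↔ ((blk.natAbs : Int) ∣ i) := by
  rw [PySem.Int.mod?_eq_some_zero_iff_dvd hb]
  exact (Int.natAbs_dvd).symm

-- Loop invariant: if i = q*(km1+1) + j with 1 ≤ j ≤ km1+1 (j chars of the current chunk
-- already folded into `ascii`), then pvALoop finishes the current chunk with the next
-- (km1+1-j) characters and then produces exactly B's chunk values.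
theorem pvALoop_eq (blk : Int) (km1 : Nat) (hb : blk.natAbs = km1 + 1) :
    ∀ (cs : List Char) (q j : Nat) (ascii : Int) (blocks : List Int),
      1 ≤ j → j ≤ km1 + 1 →
      pvALoop blk cs ((q * (km1 + 1) + j : Nat) : Int) ascii blocks
        = blocks ++ ((cs.take (km1 + 1 - j)).foldl (fun v c => 1000 * v + (c.toNat : Int)) ascii
            :: (pvChunks km1 (cs.drop (km1 + 1 - j))).map pvBlockVal) := by
  have hbne : blk ≠ 0 := by
    intro h; simp [h] at hb
  intro cs
  induction cs with
  | nil =>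
    intro q j ascii blocks h1 h2
    simp [pvALoop, pvChunks.eq_1]
  | cons c cs ih =>
    intro q j ascii blocks h1 h2
    by_cases hj : j = km1 + 1
    · -- flush: the index is divisible by km1+1
      subst hj
      have hdvd : ((blk.natAbs : Int) ∣ ((q * (km1 + 1) + (km1 + 1) : Nat) : Int)) := by
        rw [hb]; exact_mod_cast Dvd.intro (q + 1) (by ring)
      rw [pvALoop, if_pos ((pvMod?_zero_iff _ _ hbne).mpr hdvd)]
      have : ((q * (km1 + 1) + (km1 + 1) : Nat) : Int) + 1
           = (((q + 1) * (km1 + 1) + 1 : Nat) : Int) := by push_cast; ring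
      rw [this, ih (q + 1) 1 _ _ (le_refl 1) (by omega)]
      simp [pvChunks.eq_2, pvBlockVal, List.take_succ_cons]
    · -- no flush: index ≡ j (mod km1+1) with 0 < j < km1+1
      have hjlt : j < km1 + 1 := lt_of_le_of_ne h2 hj
      have hndvd : ¬ ((blk.natAbs : Int) ∣ ((q * (km1 + 1) + j : Nat) : Int)) := by
        rw [hb]
        intro hd
        have : (km1 + 1) ∣ (q * (km1 + 1) + j) := by exact_mod_cast hd
        have : (km1 + 1) ∣ j := (Nat.dvd_add_right ⟨q, by ring⟩).mp this
        exact absurd (Nat.le_of_dvd (by omega) this) (by omega)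
      rw [pvALoop, if_neg (fun h => hndvd ((pvMod?_zero_iff _ _ hbne).mp h))]
      have : ((q * (km1 + 1) + j : Nat) : Int) + 1
           = ((q * (km1 + 1) + (j + 1) : Nat) : Int) := by push_cast; ring
      rw [this, ih q (j + 1) _ _ (by omega) (by omega)]
      have htake : (c :: cs).take (km1 + 1 - j) = c :: cs.take (km1 + 1 - (j + 1)) := by
        have : km1 + 1 - j = (km1 + 1 - (j + 1)) + 1 := by omega
        rw [this, List.take_succ_cons]
      have hdrop : (c :: cs).drop (km1 + 1 - j) = cs.drop (km1 + 1 - (j + 1)) := by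
        have : km1 + 1 - j = (km1 + 1 - (j + 1)) + 1 := by omega
        rw [this, List.drop_succ_cons]
      rw [htake, hdrop]
      simp [List.foldl_cons]

-- ===== VERDICT =====
theorem message_to_ascii_blocks_spec : Claim_equal_message_to_ascii_blocks := by
  intro msg blk_size _ hpre
  obtain ⟨hne, hb1⟩ := hpre
  unfold Spec_message_to_ascii_blocks
  obtain ⟨km1, hb⟩ : ∃ km1, blk_size.natAbs = km1 + 1 := by
    refine ⟨blk_size.natAbs - 1, ?_⟩
    omega
  have hcs : msg.toList ≠ [] := by
    intro h
    exact hne (by rwa [← String.toList_eq_nil_iff])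
  have htn : blk_size.toNat - 1 = km1 := by omega
  cases hlist : msg.toList with
  | nil => exact absurd hlist hcs
  | cons c rest =>
    simp only [message_to_ascii_blocks, message_to_ascii_blocks_alt, hlist, if_pos hb1, htn]
    have h1 : (1 : Int) = ((0 * (km1 + 1) + 1 : Nat) : Int) := by push_cast; ring
    rw [h1, pvALoop_eq blk_size km1 hb rest 0 1 _ _ (le_refl 1) (by omega)]
    simp only [List.nil_append]
    rw [pvChunks.eq_2]
    simp [pvBlockVal, List.take_succ_cons]

@[simp]
theorem message_to_ascii_blocks_raises : Claim_raises_message_to_ascii_blocks := by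
  unfold Claim_raises_message_to_ascii_blocks
  constructor
  · intro msg blk_size _ hr hp
    exact hp.1 hr.1
  · refine ⟨by decide, by decide, ?_⟩
    show message_to_ascii_blocks_alt "" 1 = []
    simp only [message_to_ascii_blocks_alt]
    rw [show ("" : String).toList = [] from rfl]
    simp [pvChunks.eq_1]
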